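-- pv_equiv track=rewrite | github.com/mfethe1/enhanced-lmstudio-mcp- | server.py | _compact_text
-- ===== SOURCE A (Python) =====
-- def _compact_text(text: str, max_chars: int = 4000) -> str:
--     """Compact overly verbose LLM output and cap size.
--     - Trim to max_chars
--     - Remove immediate duplicate consecutive lines
--     - Collapse excessive blank lines
--     """
--     if not isinstance(text, str):
--         text = str(text)
--     # Normalize newlines
--     text = text.replace("\r\n", "\n").replace("\r", "\n")
--     lines = text.split("\n")
--     compact = []
--     last = None
--     blank_streak = 0
--     for ln in lines:
--         if ln == last:
--             # skip exact consecutive duplicates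
--             continue
--         if ln.strip() == "":
--             blank_streak += 1
--             # Allow at most one blank line in a row
--             if blank_streak > 1:
--                 continue
--         else:
--             blank_streak = 0
--         compact.append(ln)
--         last = ln
--     out = "\n".join(compact)
--     if len(out) > max_chars:
--         out = out[:max_chars]
--     return out
-- ===== SOURCE B (Python) =====
-- def _compact_text(text: str, max_chars: int = 4000) -> str:
--     """Run-skipping scanner: keep each line, then jump the index past its whole
--     run (equal copies for non-blank lines, any further blanks for blank lines)."""
--     if not isinstance(text, str):
--         text = str(text)
--     text = text.replace("\r\n", "\n").replace("\r", "\n")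
--     lines = text.split("\n")
--     kept = []
--     i, n = 0, len(lines)
--     while i < n:
--         ln = lines[i]
--         kept.append(ln)
--         i += 1
--         if ln.strip() == "":
--             while i < n and lines[i].strip() == "":
--                 i += 1
--         else:
--             while i < n and lines[i] == ln:
--                 i += 1
--     out = "\n".join(kept)
--     return out[:max_chars] if len(out) > max_chars else out
-- ===== Notes on version B (the rewrite author's own statement) =====
-- stated objective: alternative
-- what changed: A's element-wise loop carrying (last appended line, blank_streak) state is replaced by a run-skipping scanner: keep the current line, then jump the cursor past the whole run it starts (further equal copies for a non-blank line, all further blank lines for a blank line), with no carried state between runs.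
import Mathlib
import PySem

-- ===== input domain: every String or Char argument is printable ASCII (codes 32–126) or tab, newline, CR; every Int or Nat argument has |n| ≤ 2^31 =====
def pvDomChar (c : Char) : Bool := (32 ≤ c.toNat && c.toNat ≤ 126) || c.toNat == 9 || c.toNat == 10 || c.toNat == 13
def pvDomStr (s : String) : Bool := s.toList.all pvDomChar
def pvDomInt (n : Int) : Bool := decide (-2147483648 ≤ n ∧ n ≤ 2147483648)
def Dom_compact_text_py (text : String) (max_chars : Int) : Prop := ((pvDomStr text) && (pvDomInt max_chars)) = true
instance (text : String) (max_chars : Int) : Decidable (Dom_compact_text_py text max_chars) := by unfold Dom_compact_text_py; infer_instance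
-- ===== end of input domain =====

-- B replaces A's stateful element-wise loop (last line + blank_streak) by a stateless
-- run-skipping scanner: keep a line, then jump past its whole run. Objective: alternative.

-- ===== PORT A =====
-- A's fused loop: state = (last appended line, blank_streak)
def pvLoopA : List (List Char) → Option (List Char) → Int → List (List Char)
  | [], _, _ => []
  | ln :: rest, last, bs =>
    if some ln = last then pvLoopA rest last bs
    else if PySem.Chars.strip ln = [] then
      (if bs + 1 > 1 then pvLoopA rest last (bs + 1)
       else ln :: pvLoopA rest (some ln) (bs + 1))
    else ln :: pvLoopA rest (some ln) 0

def compact_text_py (text : String) (max_chars : Int) : String :=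
  let t := PySem.Chars.replace (PySem.Chars.replace text.toList ['\r', '\n'] ['\n']) ['\r'] ['\n']
  let lines := PySem.Chars.splitOn t ['\n']
  let compact := pvLoopA lines none 0
  let out := PySem.Chars.join ['\n'] compact
  let out := if (PySem.List.len out) > max_chars then PySem.List.slice out none (some max_chars) else out
  String.ofList out

-- ===== PORT B =====
-- the inner `while i < n and lines[i] == ln: i += 1` loop
def pvSkipEqB (x : List Char) : List (List Char) → List (List Char)
  | [] => []
  | y :: rest => if y = x then pvSkipEqB x rest else y :: rest

-- the inner `while i < n and lines[i].strip() == "": i += 1` loop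
def pvSkipBlankB : List (List Char) → List (List Char)
  | [] => []
  | y :: rest => if PySem.Chars.strip y = [] then pvSkipBlankB rest else y :: rest

theorem pvSkipEqB_len (x : List Char) : ∀ l, (pvSkipEqB x l).length ≤ l.length := by
  intro l
  induction l with
  | nil => simp [pvSkipEqB]
  | cons y rest ih =>
    simp only [pvSkipEqB]
    split_ifs
    · exact Nat.le_succ_of_le ih
    · simp

theorem pvSkipBlankB_len : ∀ l : List (List Char), (pvSkipBlankB l).length ≤ l.length := by
  intro l
  induction l with
  | nil => simp [pvSkipBlankB]
  | cons y rest ih =>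
    simp only [pvSkipBlankB]
    split_ifs
    · exact Nat.le_succ_of_le ih
    · simp

-- the outer `while i < n` scan: keep the head line, skip the rest of its run
def pvRunsB : List (List Char) → List (List Char)
  | [] => []
  | ln :: rest =>
    if PySem.Chars.strip ln = [] then ln :: pvRunsB (pvSkipBlankB rest)
    else ln :: pvRunsB (pvSkipEqB ln rest)
  termination_by l => l.length
  decreasing_by
  · exact Nat.lt_succ_of_le (pvSkipBlankB_len rest)
  · exact Nat.lt_succ_of_le (pvSkipEqB_len ln rest)

def compact_text_py_alt (text : String) (max_chars : Int) : String :=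
  let t := PySem.Chars.replace (PySem.Chars.replace text.toList ['\r', '\n'] ['\n']) ['\r'] ['\n']
  let kept := pvRunsB (PySem.Chars.splitOn t ['\n'])
  let out := PySem.Chars.join ['\n'] kept
  String.ofList (if (PySem.List.len out) > max_chars then PySem.List.slice out none (some max_chars) else out)

-- ===== PRECONDITION & SPEC =====
def Spec_compact_text_py (text : String) (max_chars : Int) (out : String) : Prop := out = compact_text_py_alt text max_chars
instance (text : String) (max_chars : Int) (out : String) : Decidable (Spec_compact_text_py text max_chars out) := by unfold Spec_compact_text_py; infer_instance

-- ===== CLAIM (what is proved, stated in full; the proofs are below) =====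
def Claim_equal_compact_text_py : Prop := ∀ (text : String) (max_chars : Int), Dom_compact_text_py text max_chars → Spec_compact_text_py text max_chars (compact_text_py text max_chars)

-- ===== LEMMAS AND PROOFS =====
-- After appending a blank line b (blank_streak ≥ 1), A's loop equals B's blank-run skip;
-- after appending a non-blank line y (blank_streak = 0), it equals B's equal-run skip.
theorem pv_main : ∀ rest : List (List Char),
    (∀ b, PySem.Chars.strip b = [] → ∀ bs : Int, 1 ≤ bs →
        pvLoopA rest (some b) bs = pvRunsB (pvSkipBlankB rest))
    ∧ (∀ y, PySem.Chars.strip y ≠ [] →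
        pvLoopA rest (some y) 0 = pvRunsB (pvSkipEqB y rest)) := by
  intro rest
  induction rest with
  | nil => exact ⟨fun _ _ _ _ => by simp [pvLoopA, pvSkipBlankB, pvRunsB],
                  fun _ _ => by simp [pvLoopA, pvSkipEqB, pvRunsB]⟩
  | cons z rest ih =>
    constructor
    · intro b hb bs hbs
      by_cases hz : PySem.Chars.strip z = []
      · -- z blank: A skips it (dup or streak), B's blank-skip drops it
        have hA : pvLoopA (z :: rest) (some b) bs = pvLoopA rest (some b) (if z = b then bs else bs + 1) := by
          by_cases hd : z = b
          · subst hd; simp [pvLoopA]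
          · have hne : ¬ some z = some b := by simpa using hd
            rw [if_neg hd]
            simp only [pvLoopA, if_neg hne, if_pos hz, if_pos (show bs + 1 > 1 by omega)]
        rw [hA]
        simp only [pvSkipBlankB, if_pos hz]
        split_ifs with h1
        · exact ih.1 b hb bs hbs
        · exact ih.1 b hb (bs + 1) (by omega)
      · -- z non-blank: both keep it and reset to the non-blank regime
        have hne : ¬ some z = some b := by
          intro h; exact hz (by rw [Option.some_inj.mp h]; exact hb)
        simp only [pvLoopA, if_neg hne, if_neg hz, pvSkipBlankB, pvRunsB]
        exact congrArg (z :: ·) (ih.2 z hz)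
    · intro y hy
      by_cases hz : z = y
      · -- z equals the kept non-blank line: A's dup check skips it, B's equal-skip drops it
        subst hz
        simp only [pvLoopA, pvSkipEqB]
        exact ih.2 z hy
      · have hne : ¬ some z = some y := by simpa using hz
        simp only [pvLoopA, if_neg hne, pvSkipEqB, if_neg hz]
        by_cases hb : PySem.Chars.strip z = []
        · -- first blank after a non-blank: both keep it and enter the blank regime
          rw [if_pos hb, if_neg (show ¬((0:Int) + 1 > 1) by omega)]
          simp only [pvRunsB, if_pos hb]
          exact congrArg (z :: ·) (ih.1 z hb (0 + 1) (by omega))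
        · simp only [if_neg hb, pvRunsB]
          exact congrArg (z :: ·) (ih.2 z hb)

theorem pv_start (lines : List (List Char)) : pvLoopA lines none 0 = pvRunsB lines := by
  cases lines with
  | nil => simp [pvLoopA, pvRunsB]
  | cons ln rest =>
    simp only [pvLoopA, pvRunsB, reduceCtorEq, if_false]
    by_cases hb : PySem.Chars.strip ln = []
    · rw [if_pos hb, if_neg (show ¬((0:Int) + 1 > 1) by omega), if_pos hb]
      exact congrArg (ln :: ·) ((pv_main rest).1 ln hb (0 + 1) (by omega))
    · rw [if_neg hb, if_neg hb]
      exact congrArg (ln :: ·) ((pv_main rest).2 ln hb)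

-- ===== VERDICT (by name: the statement is the Claim_ definition above) =====
theorem compact_text_py_spec : Claim_equal_compact_text_py := by
  intro text max_chars _
  unfold Spec_compact_text_py compact_text_py compact_text_py_alt
  simp only [pv_start]
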